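-- pv_equiv track=rewrite | github.com/threecuptea/leetcode_python | src/leetcode/place_n_cameras_no_conflict_blocked_grid.py | canPlaceSecurityCameras
-- ===== SOURCE A (Python) =====
-- def canPlaceSecurityCameras(N, grid):
--     num_rows = len(grid)
--     num_cols = len(grid[0])
--     # Write your code here
--     def backtrack(row_idx, cameras_placed):
--         # Able to place cameras in all rows
--         if row_idx == num_rows:
--             return True
--         # # no two share the same row, column, or "diagonal".
--         cols_conflict = []
--         for r, c in cameras_placed:
--             # add the column of column conflict
--             cols_conflict.append(c)
--             diff = row_idx - r
--             # add columns of "diagonal" conflict.  If the row is two row down, then the column cannot be two column left or right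
--             cols_conflict.extend([qc for qc in [c - diff, c + diff] if qc >= 0 and qc < num_cols])
--         cols_avail = \
--             [col_idx for col_idx, val in enumerate(grid[row_idx]) if val == 0 and col_idx not in cols_conflict]
--         if not cols_avail:
--             return False
--         for col in cols_avail:
--             cameras_placed.append([row_idx, col])
--             # The path work all the way
--             if backtrack(row_idx + 1, cameras_placed):
--                 return True
--             # This path does not work
--             cameras_placed.pop()
--
--     if backtrack(row_idx = 0, cameras_placed=[]):
--         return True
--     return False
-- ===== SOURCE B (Python) =====
-- def canPlaceSecurityCameras(N, grid):
--     # Bitmask depth-first search: each row's open cells become one integer mask,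
--     # placed cameras live in three masks (columns, falling and rising diagonals)
--     # that are combined with | and shifted by one when moving to the next row.
--     free = []
--     for row in grid:
--         m = 0
--         for c, v in enumerate(row):
--             if v == 0:
--                 m |= 1 << c
--         free.append(m)
--     n = len(free)
--
--     def solve(r, cols, dr, dl):
--         if r == n:
--             return True
--         a = free[r]
--         b = cols | dr | dl
--         c = 0
--         while a:
--             if a & 1 and not b & 1:
--                 bit = 1 << c
--                 if solve(r + 1, cols | bit, (dr | bit) >> 1, (dl | bit) << 1):
--                     return True
--             a >>= 1
--             b >>= 1
--             c += 1
--         return False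
--
--     return solve(0, 0, 0, 0)
-- ===== Notes on version B (the rewrite author's own statement) =====
-- stated objective: alternative
-- what changed: Replaces A's per-row rebuild of a conflict-column list from the list of placed cameras by a bit-parallel search: each row's open cells are precomputed as one integer bitmask and the placed cameras are carried as three masks (columns, falling diagonal, rising diagonal) that are OR-combined and shifted by one per row, so conflict detection is mask arithmetic instead of scanning placed cameras and a membership list.
-- outside the precondition, e.g. on canPlaceSecurityCameras(0, [[0], [1, 0]]): A returns True, B returns False
import Mathlib
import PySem

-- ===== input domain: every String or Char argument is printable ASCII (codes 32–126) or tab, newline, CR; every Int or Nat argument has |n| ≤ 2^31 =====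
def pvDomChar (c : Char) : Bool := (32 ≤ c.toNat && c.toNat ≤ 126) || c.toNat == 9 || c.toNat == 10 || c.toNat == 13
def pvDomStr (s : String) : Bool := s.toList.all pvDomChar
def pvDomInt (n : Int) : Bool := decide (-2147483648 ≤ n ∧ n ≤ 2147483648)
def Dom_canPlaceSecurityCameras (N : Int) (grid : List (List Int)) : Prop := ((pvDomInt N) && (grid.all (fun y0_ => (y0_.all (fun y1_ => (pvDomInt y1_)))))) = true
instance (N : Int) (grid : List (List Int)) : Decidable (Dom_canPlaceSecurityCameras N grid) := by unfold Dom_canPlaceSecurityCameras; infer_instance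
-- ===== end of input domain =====

-- B replaces A's per-row rebuild of a conflict-column list (a scan over all placed
-- cameras) by a bit-parallel search: one bitmask of open cells per row, and three
-- masks (columns, falling diagonal, rising diagonal) OR-combined and shifted per row.

-- ===== PORT A =====
-- backtrack(row_idx, cameras_placed); recursion is structural on the rows still to fill
-- (rows = grid[row_idx:]), so 'rows = []' is Python's 'row_idx == num_rows'.
def pvBtA (numCols : Int) (rows : List (List Int)) (rowIdx : Int)
    (placed : List (Int × Int)) : Bool :=
  match rows with
  | [] => true
  | row :: rest =>
    -- cols_conflict: for r, c in cameras_placed: append c; extend the in-range diagonals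
    let colsConflict : List Int := placed.foldl (fun acc p =>
      let diff := rowIdx - p.1
      acc ++ ([p.2] ++ ([p.2 - diff, p.2 + diff].filter
        (fun qc => decide (0 ≤ qc) && decide (qc < numCols))))) []
    let colsAvail : List Int := ((PySem.List.enumerate row).filter
      (fun p => decide (p.2 = 0) && !(colsConflict.contains p.1))).map (fun p => p.1)
    if colsAvail.isEmpty then false
    else colsAvail.any (fun col => pvBtA numCols rest (rowIdx + 1) (placed ++ [(rowIdx, col)]))

def canPlaceSecurityCameras (N : Int) (grid : List (List Int)) : Bool :=
  -- num_cols = len(grid[0]): Python raises IndexError on grid = []; Pre_ excludes it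
  let numCols : Int := ((grid.headD []).length : Int)
  pvBtA numCols grid 0 []

-- ===== PORT B =====
-- All Python ints handled by B are nonnegative bitmasks, so the masks are ported as
-- Nat; Nat's &&&, |||, <<<, >>> are exactly Python's &, |, <<, >> on nonnegatives.
-- inner loop 'for c, v in enumerate(row): if v == 0: m |= 1 << c'
def pvFreeAux (row : List Int) (c : Nat) (m : Nat) : Nat :=
  match row with
  | [] => m
  | v :: rest => pvFreeAux rest (c + 1) (if v = 0 then m ||| (1 <<< c) else m)

def pvFree (row : List Int) : Nat := pvFreeAux row 0 0

-- 'while a: if a & 1 and not b & 1: … ; a >>= 1; b >>= 1; c += 1; return False'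
def pvScan (a b c : Nat) (f : Nat → Bool) : Bool :=
  if h : a = 0 then false
  else (((a &&& 1 == 1) && !(b &&& 1 == 1)) && f c) || pvScan (a >>> 1) (b >>> 1) (c + 1) f
termination_by a
decreasing_by simp only [Nat.shiftRight_one]; exact Nat.div_lt_self (Nat.pos_of_ne_zero h) one_lt_two

-- solve(r, cols, dr, dl); structural on the suffix free[r:]
def pvSolve (free : List Nat) (cols dr dl : Nat) : Bool :=
  match free with
  | [] => true
  | fr :: rest =>
    pvScan fr (cols ||| dr ||| dl) 0 (fun c =>
      pvSolve rest (cols ||| (1 <<< c)) ((dr ||| (1 <<< c)) >>> 1) ((dl ||| (1 <<< c)) <<< 1))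

def canPlaceSecurityCameras_alt (N : Int) (grid : List (List Int)) : Bool :=
  pvSolve (grid.map pvFree) 0 0 0

-- ===== PRECONDITION & SPEC =====
-- Pre_ excludes the empty grid, on which A raises IndexError at len(grid[0]), and
-- malformed ragged grids containing a row longer than the first: there A's
-- diagonal-conflict bound, keyed to len(grid[0]), silently drops conflicts at the
-- extra columns — an accident of the implementation on inputs that are not grids.
def Pre_canPlaceSecurityCameras (N : Int) (grid : List (List Int)) : Prop :=
  grid ≠ [] ∧ ∀ row ∈ grid, row.length ≤ (grid.headD []).length
instance (N : Int) (grid : List (List Int)) : Decidable (Pre_canPlaceSecurityCameras N grid) := by unfold Pre_canPlaceSecurityCameras; infer_instance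
def pvWitness_canPlaceSecurityCameras : Int × List (List Int) := (0, [[0, 1], [1, 0]])

def Spec_canPlaceSecurityCameras (N : Int) (grid : List (List Int)) (out : Bool) : Prop := out = canPlaceSecurityCameras_alt N grid
instance (N : Int) (grid : List (List Int)) (out : Bool) : Decidable (Spec_canPlaceSecurityCameras N grid out) := by unfold Spec_canPlaceSecurityCameras; infer_instance

-- ===== CLAIM (what is proved, stated in full; the proofs are below) =====
def Claim_equal_canPlaceSecurityCameras : Prop := ∀ (N : Int) (grid : List (List Int)), Dom_canPlaceSecurityCameras N grid → Pre_canPlaceSecurityCameras N grid → Spec_canPlaceSecurityCameras N grid (canPlaceSecurityCameras N grid)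

-- ===== LEMMAS AND PROOFS =====

theorem pvIfEmpty {α : Type} (l : List α) (f : α → Bool) :
    (if l.isEmpty then false else l.any f) = l.any f := by cases l <;> simp

-- the while-loop tests exactly the bit positions set in a and clear in b
theorem pvScan_spec (a b c : Nat) (f : Nat → Bool) :
    pvScan a b c f = true ↔ ∃ i : Nat, a.testBit i ∧ ¬ b.testBit i ∧ f (c + i) = true := by
  induction a using Nat.strong_induction_on generalizing b c with
  | _ a ih =>
    rw [pvScan]
    by_cases h : a = 0
    · simp [h]
    · rw [dif_neg h]
      have hrec := ih (a >>> 1)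
        (by simpa only [Nat.shiftRight_one] using Nat.div_lt_self (Nat.pos_of_ne_zero h) one_lt_two)
        (b >>> 1) (c + 1)
      rw [Bool.or_eq_true, hrec, Bool.and_eq_true, Bool.and_eq_true]
      simp only [Nat.and_one_is_mod, Nat.testBit_shiftRight, beq_iff_eq, Bool.not_eq_eq_eq_not,
        Bool.not_true, Nat.testBit_shiftRight]
      constructor
      · rintro (⟨⟨h1, h2⟩, h3⟩ | ⟨i, h1, h2, h3⟩)
        · refine ⟨0, ?_, ?_, by simpa using h3⟩
          · simpa [Nat.testBit_zero] using h1
          · simp only [Nat.testBit_zero, decide_eq_true_eq]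
            intro hb; simp [hb] at h2
        · refine ⟨1 + i, h1, h2, ?_⟩
          rw [show c + (1 + i) = c + 1 + i by omega]; exact h3
      · rintro ⟨i, h1, h2, h3⟩
        cases i with
        | zero =>
          left
          refine ⟨⟨by simpa [Nat.testBit_zero] using h1, ?_⟩, by simpa using h3⟩
          have hb : ¬ b % 2 = 1 := by simpa [Nat.testBit_zero] using h2
          simpa using hb
        | succ i =>
          right
          refine ⟨i, by rwa [Nat.add_comm 1 i], by rwa [Nat.add_comm 1 i], ?_⟩
          rw [show c + 1 + i = c + (i + 1) by omega]; exact h3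

-- the free mask of a row has exactly the bits of its zero cells
theorem pvFreeAux_testBit (row : List Int) :
    ∀ (c m : Nat) (i : Nat), (pvFreeAux row c m).testBit i ↔
      m.testBit i ∨ ∃ k : Nat, ∃ _ : k < row.length, row[k] = 0 ∧ i = c + k := by
  induction row with
  | nil => intro c m i; simp [pvFreeAux]
  | cons v rest ih =>
    intro c m i
    rw [pvFreeAux, ih]
    constructor
    · rintro (hm | ⟨k, hk, hz, rfl⟩)
      · by_cases hv : v = 0
        · rw [if_pos hv] at hm
          rcases (by simpa [Nat.testBit_or, Nat.one_shiftLeft, Nat.testBit_two_pow] using hm :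
              m.testBit i = true ∨ c = i) with h | h
          · exact Or.inl h
          · exact Or.inr ⟨0, by simp, by simpa using hv, by omega⟩
        · rw [if_neg hv] at hm; exact Or.inl hm
      · exact Or.inr ⟨k + 1, by simpa using hk, by simpa using hz, by omega⟩
    · rintro (hm | ⟨k, hk, hz, rfl⟩)
      · left
        by_cases hv : v = 0
        · rw [if_pos hv]; simp [Nat.testBit_or, hm]
        · rwa [if_neg hv]
      · cases k with
        | zero =>
          left
          have hv : v = 0 := by simpa using hz
          rw [if_pos hv]
          simp [Nat.testBit_or, Nat.one_shiftLeft]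
        | succ k =>
          right
          exact ⟨k, by simpa using hk, by simpa using hz, by omega⟩

theorem pvFree_testBit (row : List Int) (i : Nat) :
    (pvFree row).testBit i ↔ ∃ _ : i < row.length, row[i] = 0 := by
  rw [pvFree, pvFreeAux_testBit]
  simp only [Nat.zero_testBit, Bool.false_eq_true, false_or, Nat.zero_add]
  constructor
  · rintro ⟨k, hk, hz, rfl⟩; exact ⟨hk, hz⟩
  · rintro ⟨hk, hz⟩; exact ⟨i, hk, hz, rfl⟩

theorem pv_main (numCols : Int) (rows : List (List Int)) :
    ∀ (rowIdx : Int) (placed : List (Int × Int)) (cols dr dl : Nat),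
    (∀ row ∈ rows, (row.length : Int) ≤ numCols) →
    (∀ p ∈ placed, 0 ≤ p.2 ∧ p.1 < rowIdx) →
    (∀ c : Nat, cols.testBit c = true ↔ ∃ p ∈ placed, p.2 = (c : Int)) →
    (∀ c : Nat, dr.testBit c = true ↔ ∃ p ∈ placed, p.2 - (rowIdx - p.1) = (c : Int)) →
    (∀ c : Nat, dl.testBit c = true ↔ ∃ p ∈ placed, p.2 + (rowIdx - p.1) = (c : Int)) →
    pvBtA numCols rows rowIdx placed = pvSolve (rows.map pvFree) cols dr dl := by
  induction rows with
  | nil => intro rowIdx placed cols dr dl _ _ _ _ _; rfl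
  | cons row rest ih =>
    intro rowIdx placed cols dr dl hlen hpl hcols hdr hdl
    -- the recursive step: placing column k keeps the invariants in lock-step
    have step : ∀ k : Nat,
        pvBtA numCols rest (rowIdx + 1) (placed ++ [(rowIdx, (k : Int))])
          = pvSolve (rest.map pvFree) (cols ||| (1 <<< k))
              ((dr ||| (1 <<< k)) >>> 1) ((dl ||| (1 <<< k)) <<< 1) := by
      intro k
      refine ih (rowIdx + 1) _ _ _ _ (fun r hr => hlen r (List.mem_cons_of_mem _ hr)) ?_ ?_ ?_ ?_
      · intro p hp
        rcases List.mem_append.mp hp with h | h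
        · exact ⟨(hpl p h).1, by have := (hpl p h).2; omega⟩
        · rw [List.mem_singleton.mp h]
          exact ⟨by simp, by omega⟩
      · intro c
        simp only [Nat.testBit_or, Nat.one_shiftLeft, Nat.testBit_two_pow, Bool.or_eq_true,
          decide_eq_true_eq, List.mem_append, List.mem_singleton]
        constructor
        · rintro (h | h)
          · obtain ⟨p, hp, he⟩ := (hcols c).mp h
            exact ⟨p, Or.inl hp, he⟩
          · exact ⟨(rowIdx, (k : Int)), Or.inr rfl, by simpa using h⟩
        · rintro ⟨p, hp | rfl, he⟩
          · exact Or.inl ((hcols c).mpr ⟨p, hp, he⟩)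
          · exact Or.inr (by simpa using he)
      · intro c
        simp only [Nat.testBit_shiftRight, Nat.testBit_or, Nat.one_shiftLeft, Nat.testBit_two_pow,
          Bool.or_eq_true, decide_eq_true_eq, List.mem_append, List.mem_singleton]
        rw [Nat.add_comm 1 c]
        constructor
        · rintro (h | h)
          · obtain ⟨p, hp, he⟩ := (hdr (c + 1)).mp h
            refine ⟨p, Or.inl hp, ?_⟩
            have : ((c + 1 : Nat) : Int) = (c : Int) + 1 := by push_cast; ring
            rw [this] at he; omega
          · refine ⟨(rowIdx, (k : Int)), Or.inr rfl, ?_⟩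
            have : (k : Int) = (c : Int) + 1 := by exact_mod_cast h
            omega
        · rintro ⟨p, hp | rfl, he⟩
          · refine Or.inl ((hdr (c + 1)).mpr ⟨p, hp, ?_⟩)
            have : ((c + 1 : Nat) : Int) = (c : Int) + 1 := by push_cast; ring
            rw [this]; omega
          · right
            have : (k : Int) = (c : Int) + 1 := by simp at he; omega
            exact_mod_cast this
      · intro c
        simp only [Nat.testBit_shiftLeft, Nat.testBit_or, Nat.one_shiftLeft, Nat.testBit_two_pow,
          Bool.and_eq_true, Bool.or_eq_true, decide_eq_true_eq, List.mem_append, List.mem_singleton]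
        cases c with
        | zero =>
          constructor
          · rintro ⟨h, -⟩; omega
          · rintro ⟨p, hp | rfl, he⟩
            · have h1 := (hpl p hp).1
              have h2 := (hpl p hp).2
              simp only [Nat.cast_zero] at he; omega
            · simp only [Nat.cast_zero] at he
              have : (0 : Int) ≤ (k : Int) := by exact_mod_cast Nat.zero_le k
              omega
        | succ c =>
          simp only [Nat.add_sub_cancel]
          constructor
          · rintro ⟨-, h | h⟩
            · obtain ⟨p, hp, he⟩ := (hdl c).mp h
              refine ⟨p, Or.inl hp, ?_⟩
              have : ((c + 1 : Nat) : Int) = (c : Int) + 1 := by push_cast; ring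
              rw [this]; omega
            · refine ⟨(rowIdx, (k : Int)), Or.inr rfl, ?_⟩
              have hkc : (k : Int) = (c : Int) := by exact_mod_cast h
              have : ((c + 1 : Nat) : Int) = (c : Int) + 1 := by push_cast; ring
              rw [this]; omega
          · rintro ⟨p, hp | rfl, he⟩
            · refine ⟨by omega, Or.inl ((hdl c).mpr ⟨p, hp, ?_⟩)⟩
              have : ((c + 1 : Nat) : Int) = (c : Int) + 1 := by push_cast; ring
              rw [this] at he; omega
            · refine ⟨by omega, Or.inr ?_⟩
              have : ((c + 1 : Nat) : Int) = (c : Int) + 1 := by push_cast; ring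
              rw [this] at he
              have : (k : Int) = (c : Int) := by simp at he; omega
              exact_mod_cast this
    -- blocked mask = membership in A's rebuilt conflict list, on in-range columns
    have hrl : ((row.length : Int)) ≤ numCols := hlen row (List.mem_cons_self)
    have hcc : ∀ kk : Nat, (kk : Int) < numCols →
        ((placed.flatMap (fun q => [q.2] ++
            ([q.2 - (rowIdx - q.1), q.2 + (rowIdx - q.1)].filter
              (fun qc => decide (0 ≤ qc) && decide (qc < numCols))))).contains ((kk : Int)) = true
          ↔ (cols ||| dr ||| dl).testBit kk = true) := by
      intro kk hkk
      have hk0 : (0 : Int) ≤ (kk : Int) := by exact_mod_cast Nat.zero_le kk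
      simp only [Nat.testBit_or, Bool.or_eq_true, List.contains_iff_mem, List.mem_flatMap,
        List.mem_append, List.mem_filter, List.mem_cons, List.not_mem_nil, or_false,
        Bool.and_eq_true, decide_eq_true_eq, hcols, hdr, hdl]
      constructor
      · rintro ⟨q, hq, h | ⟨h | h, -, -⟩⟩
        · exact Or.inl (Or.inl ⟨q, hq, by omega⟩)
        · exact Or.inl (Or.inr ⟨q, hq, by omega⟩)
        · exact Or.inr ⟨q, hq, by omega⟩
      · rintro ((⟨q, hq, hv⟩ | ⟨q, hq, hv⟩) | ⟨q, hq, hv⟩)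
        · exact ⟨q, hq, Or.inl (by omega)⟩
        · exact ⟨q, hq, Or.inr ⟨Or.inl (by omega), by omega, by omega⟩⟩
        · exact ⟨q, hq, Or.inr ⟨Or.inr (by omega), by omega, by omega⟩⟩
    simp only [pvBtA, List.map_cons, pvSolve]
    rw [pvIfEmpty, List.any_map, List.any_filter, PySem.List.foldl_append_eq_flatMap]
    rw [Bool.eq_iff_iff, List.any_eq_true, pvScan_spec]
    simp only [Function.comp, List.nil_append]
    constructor
    · rintro ⟨p, hp, hb⟩
      obtain ⟨k, hk, rfl⟩ := (PySem.List.mem_enumerate_iff _ _ _).mp hp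
      simp only [Bool.and_eq_true, decide_eq_true_eq, Bool.not_eq_eq_eq_not, Bool.not_true,
        zero_add] at hb
      obtain ⟨⟨hz, hnc⟩, hrec⟩ := hb
      refine ⟨k, (pvFree_testBit row k).mpr ⟨hk, hz⟩, ?_, ?_⟩
      · intro hbit
        have hklt : ((k : Int)) < numCols := by
          have : ((k : Int)) < (row.length : Int) := by exact_mod_cast hk
          omega
        have hcontr := (hcc k hklt).mpr hbit
        rw [hcontr] at hnc
        exact absurd hnc (by simp)
      · rw [Nat.zero_add, ← step k]
        exact hrec
    · rintro ⟨i, hfree, hnb, hf⟩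
      obtain ⟨hk, hz⟩ := (pvFree_testBit row i).mp hfree
      refine ⟨((i : Int), row[i]), (PySem.List.mem_enumerate_iff _ _ _).mpr
        ⟨i, hk, by rw [zero_add]⟩, ?_⟩
      simp only [Bool.and_eq_true, decide_eq_true_eq, Bool.not_eq_eq_eq_not, Bool.not_true]
      have hklt : ((i : Int)) < numCols := by
        have : ((i : Int)) < (row.length : Int) := by exact_mod_cast hk
        omega
      refine ⟨⟨hz, ?_⟩, ?_⟩
      · by_cases hb : (placed.flatMap (fun q => [q.2] ++
            ([q.2 - (rowIdx - q.1), q.2 + (rowIdx - q.1)].filter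
              (fun qc => decide (0 ≤ qc) && decide (qc < numCols))))).contains ((i : Int)) = true
        · exact absurd ((hcc i hklt).mp hb) (by simpa using hnb)
        · simpa using hb
      · rw [step i]
        rw [Nat.zero_add] at hf
        exact hf

-- ===== VERDICT (by name: the statement is the Claim_ definition above) =====
theorem canPlaceSecurityCameras_spec : Claim_equal_canPlaceSecurityCameras := by
  intro N grid _ hPre
  unfold Spec_canPlaceSecurityCameras canPlaceSecurityCameras canPlaceSecurityCameras_alt
  exact pv_main _ grid 0 [] 0 0 0
    (by intro row hr; exact_mod_cast hPre.2 row hr)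
    (by simp) (by simp) (by simp) (by simp)
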